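-- pv_equiv track=rewrite | github.com/Keule/AOG_Boards_New | tools/run_sandbox_tests.py | _scan_for_steering_files
-- ===== SOURCE A (Python) =====
-- from typing import List, Optional, Dict
--
-- def _scan_for_steering_files(stdout: str, stderr: str) -> List[str]:
--     """Scan build output for steering component compilation."""
--     steering_patterns = [
--         "steering_control.c", "steering_output.c", "steering_safety.c",
--         "steering_diagnostics.c", "was_sensor.c", "ads1118.c",
--         "actuator_drv8263h.c", "imu_bno085.c", "aog_steering_app.c",
--         "safety_failsafe.c",
--     ]
--     combined = stdout + "\n" + stderr
--     matches = []
--     for pattern in steering_patterns: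
--         for line in combined.split("\n"):
--             if pattern in line and ("Compiling" in line or "Linking" in line):
--                 matches.append(line.strip())
--     return matches
-- ===== SOURCE B (Python) =====
-- from typing import List
--
-- def _scan_for_steering_files(stdout: str, stderr: str) -> List[str]:
--     """Scan build output for steering component compilation (single pass over lines)."""
--     steering_patterns = [
--         "steering_control.c", "steering_output.c", "steering_safety.c",
--         "steering_diagnostics.c", "was_sensor.c", "ads1118.c",
--         "actuator_drv8263h.c", "imu_bno085.c", "aog_steering_app.c",
--         "safety_failsafe.c",
--     ]
--     buckets = {p: [] for p in steering_patterns}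
--     for line in (stdout + "\n" + stderr).split("\n"):
--         if "Compiling" in line or "Linking" in line:
--             for p in steering_patterns:
--                 if p in line:
--                     buckets[p].append(line.strip())
--     matches = []
--     for p in steering_patterns:
--         matches.extend(buckets[p])
--     return matches
-- ===== Notes on version B (the rewrite author's own statement) =====
-- stated objective: faster
-- what changed: B splits the combined output into lines once and makes a single pass over them, bucketing stripped lines into a dict keyed by pattern, then concatenates the buckets in pattern order, instead of A's re-splitting and re-scanning all lines for each of the 10 patterns.
import Mathlib
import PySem

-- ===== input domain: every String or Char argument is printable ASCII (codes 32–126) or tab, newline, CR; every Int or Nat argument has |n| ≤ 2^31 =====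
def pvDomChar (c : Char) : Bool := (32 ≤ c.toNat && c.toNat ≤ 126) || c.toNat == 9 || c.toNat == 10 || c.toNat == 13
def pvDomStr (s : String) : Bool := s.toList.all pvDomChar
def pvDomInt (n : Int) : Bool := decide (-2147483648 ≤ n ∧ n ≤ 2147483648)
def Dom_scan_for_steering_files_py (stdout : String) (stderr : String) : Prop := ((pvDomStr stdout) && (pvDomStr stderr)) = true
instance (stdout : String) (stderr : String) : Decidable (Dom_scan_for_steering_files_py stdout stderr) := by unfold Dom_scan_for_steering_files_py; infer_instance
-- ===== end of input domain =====

-- B splits the combined output into lines once and buckets matches per pattern in a single pass (dict pattern -> stripped lines), then concatenates buckets in pattern order; A re-splits and re-scans every line once per pattern.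


-- the steering_patterns list, shared module constant of both programs
def pvPatterns : List String :=
  ["steering_control.c", "steering_output.c", "steering_safety.c",
   "steering_diagnostics.c", "was_sensor.c", "ads1118.c",
   "actuator_drv8263h.c", "imu_bno085.c", "aog_steering_app.c",
   "safety_failsafe.c"]

-- ===== PORT A =====
-- combined.split("\n"): Str.split? is none only for sep = "", so .getD [] is exact here
def scan_for_steering_files_py (stdout : String) (stderr : String) : List String :=
  let combined := stdout ++ "\n" ++ stderr
  pvPatterns.foldl (fun acc pattern =>
    ((PySem.Str.split? combined "\n").getD []).foldl (fun acc line =>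
      if PySem.Str.isIn pattern line
         && (PySem.Str.isIn "Compiling" line || PySem.Str.isIn "Linking" line) then
        acc ++ [PySem.Str.strip line]
      else acc) acc) []

-- ===== PORT B =====
def scan_for_steering_files_py_alt (stdout : String) (stderr : String) : List String :=
  let buckets0 : PySem.Dict String (List String) :=
    pvPatterns.foldl (fun d p => d.insert p []) PySem.Dict.empty
  let buckets :=
    ((PySem.Str.split? (stdout ++ "\n" ++ stderr) "\n").getD []).foldl (fun d line =>
      if PySem.Str.isIn "Compiling" line || PySem.Str.isIn "Linking" line then
        pvPatterns.foldl (fun d p =>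
          if PySem.Str.isIn p line then
            d.modify p [] (· ++ [PySem.Str.strip line])
          else d) d
      else d) buckets0
  pvPatterns.foldl (fun acc p => acc ++ buckets.getD p []) []

-- ===== PRECONDITION & SPEC =====
def Spec_scan_for_steering_files_py (stdout : String) (stderr : String) (out : List String) : Prop := out = scan_for_steering_files_py_alt stdout stderr
instance (stdout : String) (stderr : String) (out : List String) : Decidable (Spec_scan_for_steering_files_py stdout stderr out) := by unfold Spec_scan_for_steering_files_py; infer_instance

-- ===== CLAIM (what is proved, stated in full; the proofs are below) =====
def Claim_equal_scan_for_steering_files_py : Prop := ∀ (stdout : String) (stderr : String), Dom_scan_for_steering_files_py stdout stderr → Spec_scan_for_steering_files_py stdout stderr (scan_for_steering_files_py stdout stderr)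

-- ===== LEMMAS AND PROOFS =====

theorem pvPatterns_nodup : pvPatterns.Nodup := by decide

-- initial buckets: every lookup with default [] yields []
theorem pv_getD_foldl_insert_nil (ps : List String)
    (d : PySem.Dict String (List String)) (h : ∀ q, d.getD q [] = [])
    (q : String) : (ps.foldl (fun d p => d.insert p []) d).getD q [] = [] := by
  induction ps generalizing d with
  | nil => exact h q
  | cons p ps ih =>
      simp only [List.foldl_cons]
      refine ih _ (fun q' => ?_)
      rw [PySem.Dict.getD_insert]
      split_ifs with hq
      · rfl
      · exact h q'

-- one line's inner pattern loop: only q's bucket grows, and only if q occurs in the line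
theorem pv_inner (line : String) (ps : List String) (hnd : ps.Nodup)
    (d : PySem.Dict String (List String)) (q : String) :
    (ps.foldl (fun d p =>
        if PySem.Str.isIn p line then
          d.modify p [] (· ++ [PySem.Str.strip line])
        else d) d).getD q []
      = d.getD q []
        ++ (if q ∈ ps ∧ PySem.Str.isIn q line = true
            then [PySem.Str.strip line] else []) := by
  induction ps generalizing d with
  | nil => simp
  | cons p ps ih =>
      rcases List.nodup_cons.mp hnd with ⟨hp, hnd'⟩
      simp only [List.foldl_cons]
      rw [ih hnd']
      by_cases hq : q = p
      · subst hq
        by_cases hin : PySem.Str.isIn q line = true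
        · rw [if_pos hin, PySem.Dict.getD_modify_self,
              if_neg (fun h => hp h.1), if_pos ⟨List.mem_cons_self, hin⟩]
          simp
        · rw [if_neg hin, if_neg (fun h => hin h.2), if_neg (fun h => hin h.2)]
      · have hstep : (if PySem.Str.isIn p line = true then
              d.modify p [] (· ++ [PySem.Str.strip line]) else d).getD q []
            = d.getD q [] := by
          split_ifs with hin
          · rw [PySem.Dict.getD_modify]; simp [hq]
          · rfl
        rw [hstep]
        simp [List.mem_cons, hq]

-- the single pass over the lines fills q's bucket with exactly A's per-pattern selection
theorem pv_outer (lines : List String) (d : PySem.Dict String (List String))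
    (q : String) (hq : q ∈ pvPatterns) :
    (lines.foldl (fun d line =>
        if PySem.Str.isIn "Compiling" line || PySem.Str.isIn "Linking" line then
          pvPatterns.foldl (fun d p =>
            if PySem.Str.isIn p line then
              d.modify p [] (· ++ [PySem.Str.strip line])
            else d) d
        else d) d).getD q []
      = d.getD q []
        ++ (lines.filter (fun l =>
              PySem.Str.isIn q l
              && (PySem.Str.isIn "Compiling" l || PySem.Str.isIn "Linking" l))).map
            PySem.Str.strip := by
  induction lines generalizing d with
  | nil => simp
  | cons l ls ih =>
      simp only [List.foldl_cons, List.filter_cons]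
      by_cases hc : (PySem.Str.isIn "Compiling" l || PySem.Str.isIn "Linking" l) = true
      · rw [if_pos hc, ih, pv_inner l pvPatterns pvPatterns_nodup]
        by_cases hin : PySem.Str.isIn q l = true
        · have hpred : (PySem.Str.isIn q l
              && (PySem.Str.isIn "Compiling" l || PySem.Str.isIn "Linking" l)) = true := by
            rw [hin, hc]; rfl
          rw [if_pos ⟨hq, hin⟩, if_pos hpred, List.map_cons]
          simp [List.append_assoc]
        · have hin' : PySem.Str.isIn q l = false := by
            cases h : PySem.Str.isIn q l with
            | false => rfl
            | true => exact absurd h hin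
          rw [if_neg (fun h => hin h.2), hin']
          simp
      · have hc' : (PySem.Str.isIn "Compiling" l || PySem.Str.isIn "Linking" l) = false := by
          cases h : (PySem.Str.isIn "Compiling" l || PySem.Str.isIn "Linking" l) with
          | false => rfl
          | true => exact absurd h hc
        rw [if_neg hc, ih, hc']
        simp

-- ===== VERDICT (by name: the statement is the Claim_ definition above) =====
theorem scan_for_steering_files_py_spec : Claim_equal_scan_for_steering_files_py := by
  intro stdout stderr _
  show scan_for_steering_files_py stdout stderr = scan_for_steering_files_py_alt stdout stderr
  simp only [scan_for_steering_files_py, scan_for_steering_files_py_alt]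
  generalize (PySem.Str.split? (stdout ++ "\n" ++ stderr) "\n").getD [] = lines
  have hA := PySem.List.foldl_congr_mem pvPatterns
    (fun acc pattern =>
      lines.foldl (fun acc line =>
        if PySem.Str.isIn pattern line
           && (PySem.Str.isIn "Compiling" line || PySem.Str.isIn "Linking" line) then
          acc ++ [PySem.Str.strip line]
        else acc) acc)
    (fun acc p =>
      acc ++ (lines.filter (fun l =>
        PySem.Str.isIn p l
        && (PySem.Str.isIn "Compiling" l || PySem.Str.isIn "Linking" l))).map
          PySem.Str.strip)
    []
    (fun acc p _ => PySem.List.foldl_append_if _ _ lines acc)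
  have hB := PySem.List.foldl_congr_mem pvPatterns
    (fun acc p =>
      acc ++ (lines.foldl (fun d line =>
          if PySem.Str.isIn "Compiling" line || PySem.Str.isIn "Linking" line then
            pvPatterns.foldl (fun d p =>
              if PySem.Str.isIn p line then
                d.modify p [] (· ++ [PySem.Str.strip line])
              else d) d
          else d)
          (pvPatterns.foldl (fun d p => d.insert p ([] : List String))
            PySem.Dict.empty)).getD p [])
    (fun acc p =>
      acc ++ (lines.filter (fun l =>
        PySem.Str.isIn p l
        && (PySem.Str.isIn "Compiling" l || PySem.Str.isIn "Linking" l))).map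
          PySem.Str.strip)
    []
    (fun acc p hp => by
      dsimp only
      rw [pv_outer lines _ p hp,
          pv_getD_foldl_insert_nil pvPatterns PySem.Dict.empty (fun q => rfl) p]
      simp)
  rw [hA, hB]
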